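-- pv_equiv track=rewrite | github.com/avg16/cp-dsa | codeforces/B_Farmer_John_s_Card_Game.py | process_test_cases
-- ===== SOURCE A (Python) =====
-- def process_test_cases(num_test_cases, test_cases_data):
--     results = []
--
--     for case in test_cases_data:
--         num_decks, num_rounds, deck_list = case
--
--         for deck in deck_list:
--             deck.sort()
--
--         smallest_cards = [(deck[0], index) for index, deck in enumerate(deck_list)]
--         smallest_cards.sort()
--
--         deck_order = [card_info[1] + 1 for card_info in smallest_cards]
--         is_valid = True
--         top_card = -1
--
--         for _ in range(num_rounds):
--             current_round_cards = []
--             for cow in deck_order: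
--                 cow_index = cow - 1
--                 if deck_list[cow_index] and deck_list[cow_index][0] > top_card:
--                     top_card = deck_list[cow_index].pop(0)
--                 else:
--                     is_valid = False
--                     break
--             if not is_valid:
--                 break
--
--         if is_valid:
--             results.append(" ".join(map(str, deck_order)))
--         else:
--             results.append("-1")
--
--     return results
-- ===== SOURCE B (Python) =====
-- def process_test_cases(num_test_cases, test_cases_data):
--     # Non-mutating (A sorts/pops the input decks in place; equivalence is about the return value).
--     results = []
--     for num_decks, num_rounds, deck_list in test_cases_data:
--         decks = [sorted(d) for d in deck_list]
--         order = sorted(range(len(decks)), key=lambda i: (decks[i][0], i))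
--         out = " ".join(str(i + 1) for i in order)
--         if not decks:
--             results.append(out)
--             continue
--         if num_rounds > min(len(d) for d in decks):
--             results.append("-1")
--             continue
--         seq = [decks[i][r] for r in range(num_rounds) for i in order]
--         ok = all(b > a for a, b in zip([-1] + seq, seq))
--         results.append(out if ok else "-1")
--     return results
-- ===== Notes on version B (the rewrite author's own statement) =====
-- stated objective: simpler
-- what changed: A simulates round by round, mutating the decks by popping the smallest card and breaking on failure; B pre-checks that every deck has at least num_rounds cards, then builds the full round-major play sequence by indexing and verifies strict increase in a single zip pass, with no mutation.
import Mathlib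
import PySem

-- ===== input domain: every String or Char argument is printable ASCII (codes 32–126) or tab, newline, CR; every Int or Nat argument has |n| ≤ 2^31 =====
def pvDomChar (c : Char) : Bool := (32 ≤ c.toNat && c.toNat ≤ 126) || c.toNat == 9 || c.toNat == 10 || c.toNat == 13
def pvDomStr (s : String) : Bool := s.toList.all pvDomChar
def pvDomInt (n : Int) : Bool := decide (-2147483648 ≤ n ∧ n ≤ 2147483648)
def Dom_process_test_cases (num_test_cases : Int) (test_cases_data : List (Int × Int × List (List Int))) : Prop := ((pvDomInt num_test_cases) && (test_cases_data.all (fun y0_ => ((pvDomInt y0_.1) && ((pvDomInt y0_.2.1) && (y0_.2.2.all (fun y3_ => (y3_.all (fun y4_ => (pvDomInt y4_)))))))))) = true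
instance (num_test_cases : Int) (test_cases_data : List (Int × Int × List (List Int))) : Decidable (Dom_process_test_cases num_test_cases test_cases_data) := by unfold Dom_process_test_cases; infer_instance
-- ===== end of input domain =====

-- B replaces A's round-by-round pop-and-mutate simulation by a min-length pre-check plus one
-- round-major indexed sequence checked for strict increase in a single pass (objective: simpler).
-- A sorts and pops the caller's decks in place; the equivalence proved here is about the RETURN value only.

-- ===== PORT A =====

-- one row step: state = (decks, top_card, is_valid); once is_valid is false the step is the
-- identity, which models Python's `break` of the inner loop exactly.
def pvRowA (st : List (List Int) × Int × Bool) (cow : Int) : List (List Int) × Int × Bool :=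
  match st with
  | (decks, top, valid) =>
    if valid then
      match PySem.List.pyGetD decks (cow - 1) [] with
      | [] => (decks, top, false)
      | h :: t => if h > top then (decks.set (cow - 1).toNat t, h, true) else (decks, top, false)
    else st

-- `for _ in range(num_rounds): … ; if not is_valid: break`
def pvRoundsA (ord : List Int) : Nat → (List (List Int) × Int × Bool) → (List (List Int) × Int × Bool)
  | 0, st => st
  | r + 1, st =>
      let st' := ord.foldl pvRowA st
      if st'.2.2 then pvRoundsA ord r st' else st'

-- one test case of A.  deck[0] is ported as pyGetD _ 0 0: Python raises IndexError on an empty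
-- deck, which Pre_ excludes, so the default is never reached on claimed inputs.
def pvCaseA (case : Int × Int × List (List Int)) : String :=
  let ds := case.2.2.map (fun d => PySem.List.sorted d (fun x => x) false)
  let smallest := (PySem.List.enumerate ds).map (fun p => (PySem.List.pyGetD p.2 0 0, p.1))
  let sp := PySem.List.sorted2 smallest (fun q => q.1) (fun q => q.2) false
  let deck_order := sp.map (fun p => p.2 + 1)
  let fin := pvRoundsA deck_order case.2.1.toNat (ds, -1, true)
  if fin.2.2 then PySem.Str.join " " (deck_order.map PySem.Int.toStr) else "-1"

def process_test_cases (num_test_cases : Int) (test_cases_data : List (Int × Int × List (List Int))) : List String :=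
  test_cases_data.foldl (fun results case => results ++ [pvCaseA case]) []

-- ===== PORT B =====

-- one test case of B: sort; order by (smallest card, index); if some deck is shorter than the
-- number of rounds the answer is "-1"; otherwise build the round-major play sequence and check
-- strict increase in one zip/all pass.
def pvCaseB (case : Int × Int × List (List Int)) : String :=
  let decks := case.2.2.map (fun d => PySem.List.sorted d (fun x => x) false)
  let pairs := (PySem.List.enumerate decks).map (fun p => (PySem.List.pyGetD p.2 0 0, p.1))
  let order := (PySem.List.sorted2 pairs (fun q => q.1) (fun q => q.2) false).map (fun p => p.2)
  let out := PySem.Str.join " " (order.map (fun i => PySem.Int.toStr (i + 1)))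
  if decks = [] then out
  else
    let mn := (PySem.List.min? (decks.map (fun d => (d.length : Int))) (fun x => x)).getD 0
    if case.2.1 > mn then "-1"
    else
      let seq := (PySem.List.pyRange 0 case.2.1).flatMap
        (fun r => order.map (fun i => PySem.List.pyGetD (PySem.List.pyGetD decks i []) r 0))
      if (List.zip ((-1) :: seq) seq).all (fun p => p.2 > p.1) then out else "-1"

def process_test_cases_alt (num_test_cases : Int) (test_cases_data : List (Int × Int × List (List Int))) : List String :=
  test_cases_data.foldl (fun results case => results ++ [pvCaseB case]) []

-- ===== PRECONDITION & SPEC =====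

-- Pre_ excludes exactly the inputs on which Python A raises: a test case containing an empty
-- deck makes A's `deck[0]` raise IndexError.
def Pre_process_test_cases (num_test_cases : Int) (test_cases_data : List (Int × Int × List (List Int))) : Prop :=
  ∀ case ∈ test_cases_data, ∀ deck ∈ case.2.2, deck ≠ []

instance (num_test_cases : Int) (test_cases_data : List (Int × Int × List (List Int))) : Decidable (Pre_process_test_cases num_test_cases test_cases_data) := by unfold Pre_process_test_cases; infer_instance

def pvWitness_process_test_cases : Int × (List (Int × Int × List (List Int))) :=
  (1, [(2, 2, [[3, 1], [4, 2]])])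

def Spec_process_test_cases (num_test_cases : Int) (test_cases_data : List (Int × Int × List (List Int))) (out : List String) : Prop := out = process_test_cases_alt num_test_cases test_cases_data
instance (num_test_cases : Int) (test_cases_data : List (Int × Int × List (List Int))) (out : List String) : Decidable (Spec_process_test_cases num_test_cases test_cases_data out) := by unfold Spec_process_test_cases; infer_instance

-- ===== CLAIM (what is proved, stated in full; the proofs are below) =====
def Claim_equal_process_test_cases : Prop := ∀ (num_test_cases : Int) (test_cases_data : List (Int × Int × List (List Int))), Dom_process_test_cases num_test_cases test_cases_data → Pre_process_test_cases num_test_cases test_cases_data → Spec_process_test_cases num_test_cases test_cases_data (process_test_cases num_test_cases test_cases_data)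

-- ===== LEMMAS AND PROOFS =====

-- strict-increase check threaded from a previous value
def pvChain : Int → List Int → Bool
  | _, [] => true
  | prev, h :: t => decide (prev < h) && pvChain h t

-- last element of a list, with a default
def pvLastD (d : Int) (l : List Int) : Int := l.foldl (fun _ x => x) d

-- the cards round k deals from the decks listed in o
def pvRowVals (ds : List (List Int)) (o : List Int) (k : Nat) : List Int :=
  o.map (fun i => PySem.List.pyGetD (PySem.List.pyGetD ds i []) (k : Int) 0)

-- every deck listed in o still has a card at round k
def pvAllDef (ds : List (List Int)) (o : List Int) (k : Nat) : Bool :=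
  o.all (fun i => decide ((k : Int) < (PySem.List.pyGetD ds i []).length))

-- validity of A's simulation, round by round
def pvOk (ds : List (List Int)) (o : List Int) : Nat → Nat → Int → Bool
  | 0, _, _ => true
  | r + 1, k, top =>
      (pvAllDef ds o k && pvChain top (pvRowVals ds o k)) &&
        pvOk ds o r (k + 1) (pvLastD top (pvRowVals ds o k))

theorem pvZipAll_eq_chain (prev : Int) (l : List Int) :
    (List.zip (prev :: l) l).all (fun p => p.2 > p.1) = pvChain prev l := by
  induction l generalizing prev with
  | nil => rfl
  | cons h t ih => simp [pvChain, ← ih h, List.zip, gt_iff_lt]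

theorem pvChain_append (top : Int) (xs ys : List Int) :
    pvChain top (xs ++ ys) = (pvChain top xs && pvChain (pvLastD top xs) ys) := by
  induction xs generalizing top with
  | nil => simp [pvChain, pvLastD]
  | cons h t ih => simp [pvChain, ih h, pvLastD, Bool.and_assoc]

-- the big inner-round lemma, success case
theorem pvFoldRow_ok (ds : List (List Int)) (k : Nat) :
    ∀ (o : List Int) (dsCur : List (List Int)) (top : Int),
      o.Nodup →
      (∀ i ∈ o, 0 ≤ i ∧ i.toNat < ds.length) →
      dsCur.length = ds.length →
      (∀ i ∈ o, PySem.List.pyGetD dsCur i [] = (PySem.List.pyGetD ds i []).drop k) →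
      pvAllDef ds o k = true →
      pvChain top (pvRowVals ds o k) = true →
      ∃ dsFin,
        (o.map (· + 1)).foldl pvRowA (dsCur, top, true) =
          (dsFin, pvLastD top (pvRowVals ds o k), true) ∧
        dsFin.length = ds.length ∧
        (∀ j : Nat, j < ds.length →
          dsFin[j]? = if ((j : Int) ∈ o) then some ((PySem.List.pyGetD ds (j : Int) []).drop (k + 1))
                      else dsCur[j]?) := by
  intro o
  induction o with
  | nil =>
    intro dsCur top _ _ hlen _ _ _
    exact ⟨dsCur, by simp [pvRowVals, pvLastD], hlen, fun j hj => by simp⟩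
  | cons i o ih =>
    intro dsCur top hnd hbnd hlen hcur hdef hchain
    obtain ⟨hi0, hilt⟩ := hbnd i (by simp)
    have hdefi : (k : Int) < (PySem.List.pyGetD ds i []).length := by
      have := (List.all_eq_true.mp hdef) i (by simp); simpa using this
    have hklt : k < (PySem.List.pyGetD ds i []).length := by exact_mod_cast hdefi
    have hdrop : (PySem.List.pyGetD ds i []).drop k
        = (PySem.List.pyGetD ds i [])[k] :: (PySem.List.pyGetD ds i []).drop (k + 1) :=
      List.drop_eq_getElem_cons hklt
    have hval : PySem.List.pyGetD (PySem.List.pyGetD ds i []) (k : Int) 0 = (PySem.List.pyGetD ds i [])[k] := by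
      rw [PySem.List.pyGetD_of_nonneg _ _ (by positivity)]
      simp [List.getD_eq_getElem?_getD, List.getElem?_eq_getElem hklt]
    have hchain' := hchain
    simp only [pvRowVals, List.map_cons, pvChain, Bool.and_eq_true, decide_eq_true_eq] at hchain'
    obtain ⟨hlt, hrest⟩ := hchain'
    rw [hval] at hlt
    -- the step on i
    have hstep : pvRowA (dsCur, top, true) (i + 1) =
        (dsCur.set i.toNat ((PySem.List.pyGetD ds i []).drop (k + 1)),
          (PySem.List.pyGetD ds i [])[k], true) := by
      simp only [pvRowA, add_sub_cancel_right, if_true]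
      rw [hcur i (by simp), hdrop]
      simp [hlt]
    -- IH hyps for the updated state
    have hcur' : ∀ i' ∈ o, PySem.List.pyGetD (dsCur.set i.toNat ((PySem.List.pyGetD ds i []).drop (k+1))) i' []
        = (PySem.List.pyGetD ds i' []).drop k := by
      intro i' hi'
      have hne : i' ≠ i := fun h => (List.nodup_cons.mp hnd).1 (h ▸ hi')
      obtain ⟨h0', hlt'⟩ := hbnd i' (by simp [hi'])
      rw [PySem.List.pyGetD_eq_getElem _ _ h0' (by rw [List.length_set]; omega)]
      rw [List.getElem_set_ne (by intro h; apply hne; omega)]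
      rw [← PySem.List.pyGetD_eq_getElem _ ([] : List Int) h0' (by omega)]
      exact hcur i' (by simp [hi'])
    obtain ⟨dsFin, hfold, hflen, hfpt⟩ := ih (dsCur.set i.toNat _) ((PySem.List.pyGetD ds i [])[k])
      (List.nodup_cons.mp hnd).2 (fun i' hi' => hbnd i' (by simp [hi'])) (by simpa using hlen) hcur'
      (by simp only [pvAllDef, List.all_cons, Bool.and_eq_true] at hdef; exact hdef.2)
      (by rw [← hval]; simpa [pvRowVals] using hrest)
    refine ⟨dsFin, ?_, hflen, ?_⟩
    · rw [List.map_cons, List.foldl_cons, hstep, hfold]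
      congr 1
      rw [show pvRowVals ds (i :: o) k
            = PySem.List.pyGetD (PySem.List.pyGetD ds i []) (↑k) 0 :: pvRowVals ds o k from rfl, hval]
      rfl
    · intro j hj
      rw [hfpt j hj]
      by_cases hjo : ((j : Int) ∈ o)
      · simp [hjo]
      · by_cases hji : (j : Int) = i
        · have hjt : i.toNat = j := by omega
          rw [if_neg hjo, if_pos (by simp [hji]), hjt, List.getElem?_set_self (by omega), hji]
        · have hne : i.toNat ≠ j := by omega
          rw [if_neg hjo, if_neg (by simp [hji, hjo]), List.getElem?_set_ne hne]

-- once invalid, the inner loop is inert (Python: break)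
theorem pvFold_invalid (l : List Int) (d : List (List Int)) (t : Int) :
    l.foldl pvRowA (d, t, false) = (d, t, false) := by
  induction l with
  | nil => rfl
  | cons x xs ih => simpa [pvRowA] using ih

-- the big inner-round lemma, failure case
theorem pvFoldRow_bad (ds : List (List Int)) (k : Nat) :
    ∀ (o : List Int) (dsCur : List (List Int)) (top : Int),
      o.Nodup →
      (∀ i ∈ o, 0 ≤ i ∧ i.toNat < ds.length) →
      dsCur.length = ds.length →
      (∀ i ∈ o, PySem.List.pyGetD dsCur i [] = (PySem.List.pyGetD ds i []).drop k) →
      ¬(pvAllDef ds o k = true ∧ pvChain top (pvRowVals ds o k) = true) →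
      ((o.map (· + 1)).foldl pvRowA (dsCur, top, true)).2.2 = false := by
  intro o
  induction o with
  | nil => intro dsCur top _ _ _ _ hbad; exact absurd ⟨rfl, rfl⟩ hbad
  | cons i o ih =>
    intro dsCur top hnd hbnd hlen hcur hbad
    obtain ⟨hi0, hilt⟩ := hbnd i (by simp)
    by_cases hdefi : (k : Int) < (PySem.List.pyGetD ds i []).length
    · have hklt : k < (PySem.List.pyGetD ds i []).length := by exact_mod_cast hdefi
      have hdrop : (PySem.List.pyGetD ds i []).drop k
          = (PySem.List.pyGetD ds i [])[k] :: (PySem.List.pyGetD ds i []).drop (k + 1) :=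
        List.drop_eq_getElem_cons hklt
      have hval : PySem.List.pyGetD (PySem.List.pyGetD ds i []) (k : Int) 0 = (PySem.List.pyGetD ds i [])[k] := by
        rw [PySem.List.pyGetD_of_nonneg _ _ (by positivity)]
        simp [List.getD_eq_getElem?_getD, List.getElem?_eq_getElem hklt]
      by_cases hlt : top < (PySem.List.pyGetD ds i [])[k]
      · -- step succeeds, failure is later
        have hstep : pvRowA (dsCur, top, true) (i + 1) =
            (dsCur.set i.toNat ((PySem.List.pyGetD ds i []).drop (k + 1)),
              (PySem.List.pyGetD ds i [])[k], true) := by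
          simp only [pvRowA, add_sub_cancel_right, if_true]
          rw [hcur i (by simp), hdrop]
          simp [hlt]
        have hcur' : ∀ i' ∈ o, PySem.List.pyGetD (dsCur.set i.toNat ((PySem.List.pyGetD ds i []).drop (k+1))) i' []
            = (PySem.List.pyGetD ds i' []).drop k := by
          intro i' hi'
          have hne : i' ≠ i := fun h => (List.nodup_cons.mp hnd).1 (h ▸ hi')
          obtain ⟨h0', hlt'⟩ := hbnd i' (by simp [hi'])
          rw [PySem.List.pyGetD_eq_getElem _ _ h0' (by rw [List.length_set]; omega)]
          rw [List.getElem_set_ne (by intro h; apply hne; omega)]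
          rw [← PySem.List.pyGetD_eq_getElem _ ([] : List Int) h0' (by omega)]
          exact hcur i' (by simp [hi'])
        rw [List.map_cons, List.foldl_cons, hstep]
        apply ih _ _ (List.nodup_cons.mp hnd).2 (fun i' hi' => hbnd i' (by simp [hi']))
          (by simpa using hlen) hcur'
        intro ⟨hdef', hchain'⟩
        apply hbad
        constructor
        · simp only [pvAllDef, List.all_cons, Bool.and_eq_true]
          exact ⟨by simpa using hdefi, hdef'⟩
        · rw [show pvRowVals ds (i :: o) k
              = PySem.List.pyGetD (PySem.List.pyGetD ds i []) (↑k) 0 :: pvRowVals ds o k from rfl]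
          simp only [pvChain, Bool.and_eq_true, decide_eq_true_eq, hval]
          exact ⟨hlt, by rw [← hval] at hchain' ⊢; exact hchain'⟩
      · -- head fails the strict-increase test
        have hstep : pvRowA (dsCur, top, true) (i + 1) = (dsCur, top, false) := by
          simp only [pvRowA, add_sub_cancel_right, if_true]
          rw [hcur i (by simp), hdrop]
          simp [hlt]
        rw [List.map_cons, List.foldl_cons, hstep, pvFold_invalid]
    · -- deck i is already empty at round k
      have hklt : ¬ k < (PySem.List.pyGetD ds i []).length := by
        intro h; exact hdefi (by exact_mod_cast h)
      have hstep : pvRowA (dsCur, top, true) (i + 1) = (dsCur, top, false) := by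
        simp only [pvRowA, add_sub_cancel_right, if_true]
        rw [hcur i (by simp), List.drop_eq_nil_of_le (by omega)]
      rw [List.map_cons, List.foldl_cons, hstep, pvFold_invalid]

-- the outer loop computes pvOk
theorem pvRounds_valid (ds : List (List Int)) (o : List Int)
    (hperm : o.Perm ((List.range ds.length).map (fun j : Nat => (j : Int)))) :
    ∀ (r k : Nat) (top : Int),
      (pvRoundsA (o.map (· + 1)) r (ds.map (List.drop k), top, true)).2.2 = pvOk ds o r k top := by
  have hnd : o.Nodup := by
    have h : ((List.range ds.length).map (fun j : Nat => (j : Int))).Nodup :=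
      List.nodup_range.map (fun a b h => by exact_mod_cast h)
    exact hperm.nodup_iff.mpr h
  have hmem : ∀ i ∈ o, 0 ≤ i ∧ i.toNat < ds.length := by
    intro i hi
    have h : ∃ a, a < ds.length ∧ (a : Int) = i := by simpa using hperm.mem_iff.mp hi
    obtain ⟨a, ha, rfl⟩ := h
    exact ⟨Int.natCast_nonneg a, by simpa using ha⟩
  have hcov : ∀ j : Nat, j < ds.length → (j : Int) ∈ o := by
    intro j hj
    exact hperm.mem_iff.mpr (List.mem_map.mpr ⟨j, List.mem_range.mpr hj, rfl⟩)
  intro r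
  induction r with
  | zero => intro k top; rfl
  | succ r ih =>
    intro k top
    have hcur : ∀ i ∈ o, PySem.List.pyGetD (ds.map (List.drop k)) i [] = (PySem.List.pyGetD ds i []).drop k := by
      intro i hi
      obtain ⟨h0, hlt⟩ := hmem i hi
      rw [PySem.List.pyGetD_eq_getElem _ _ h0 (by simp; omega),
        List.getElem_map, ← PySem.List.pyGetD_eq_getElem _ ([] : List Int) h0 (by omega)]
    by_cases hcond : pvAllDef ds o k = true ∧ pvChain top (pvRowVals ds o k) = true
    · obtain ⟨dsFin, hfold, hflen, hfpt⟩ :=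
        pvFoldRow_ok ds k o (ds.map (List.drop k)) top hnd hmem (by simp) hcur hcond.1 hcond.2
      have hdsFin : dsFin = ds.map (List.drop (k + 1)) := by
        apply List.ext_getElem?
        intro j
        by_cases hj : j < ds.length
        · rw [hfpt j hj, if_pos (hcov j hj), List.getElem?_map, List.getElem?_eq_getElem hj,
            PySem.List.pyGetD_eq_getElem ds ([] : List Int) (Int.natCast_nonneg j) (by omega)]
          simp
        · rw [List.getElem?_eq_none (by omega), List.getElem?_eq_none (by simpa using (by omega : ds.length ≤ j))]
      show ((pvRoundsA (o.map (· + 1)) (r + 1)) (ds.map (List.drop k), top, true)).2.2 = _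
      rw [pvRoundsA, hfold]
      rw [if_pos rfl]
      rw [hdsFin, ih (k + 1)]
      rw [pvOk]
      simp [hcond.1, hcond.2]
    · have hbad := pvFoldRow_bad ds k o (ds.map (List.drop k)) top hnd hmem (by simp) hcur hcond
      rw [pvRoundsA]
      simp only [hbad, Bool.false_eq_true, if_false, pvOk]
      rcases Decidable.not_and_iff_not_or_not.mp hcond with h | h <;>
        simp [Bool.eq_false_iff.mpr h]

-- pvOk unrolled into a length check plus one chained sequence
theorem pvOk_eq (ds : List (List Int)) (o : List Int) :
    ∀ (r k : Nat) (top : Int),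
      pvOk ds o r k top =
        ((List.range r).all (fun ρ => pvAllDef ds o (k + ρ)) &&
          pvChain top ((List.range r).flatMap (fun ρ => pvRowVals ds o (k + ρ)))) := by
  intro r
  induction r with
  | zero => intro k top; rfl
  | succ r ih =>
    intro k top
    rw [pvOk, ih (k + 1), List.range_succ_eq_map]
    simp only [List.all_cons, List.flatMap_cons, List.all_map, List.flatMap_map, Nat.add_zero]
    rw [pvChain_append]
    have h1 : (fun ρ => pvAllDef ds o (k + 1 + ρ)) = (fun a => pvAllDef ds o (k + (a + 1))) := by
      funext a; congr 1; omega
    have h2 : (fun ρ => pvRowVals ds o (k + 1 + ρ)) = (fun a => pvRowVals ds o (k + (a + 1))) := by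
      funext a; congr 1; omega
    rw [h1, h2]
    have h3 : ((fun ρ => pvAllDef ds o (k + ρ)) ∘ Nat.succ) = (fun a => pvAllDef ds o (k + (a + 1))) := by
      funext a; rfl
    rw [h3]
    cases hA : pvAllDef ds o k <;> cases hC : pvChain top (pvRowVals ds o k) <;>
      simp [Nat.succ_eq_add_one]

-- pyRange 0 m as a mapped Nat range (empty for m ≤ 0, like Python)
theorem pvPyRange_toNat (m : Int) :
    PySem.List.pyRange 0 m = (List.range m.toNat).map (fun k : Nat => (k : Int)) := by
  by_cases h : 0 ≤ m
  · rw [← Int.toNat_of_nonneg h, PySem.List.pyRange_zero_natCast, Int.toNat_natCast]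
  · rw [show m.toNat = 0 by omega]
    simp [PySem.List.pyRange]
    omega

-- the per-case equality
theorem pvCase_eq (case : Int × Int × List (List Int)) : pvCaseA case = pvCaseB case := by
  obtain ⟨n, m, dl⟩ := case
  simp only [pvCaseA, pvCaseB]
  set ds := dl.map (fun d => PySem.List.sorted d (fun x => x) false) with hds
  set pairs := (PySem.List.enumerate ds).map (fun p => (PySem.List.pyGetD p.2 0 0, p.1)) with hpairs
  set sp := PySem.List.sorted2 pairs (fun q => q.1) (fun q => q.2) false with hsp
  set order := sp.map (fun p => p.2) with horder
  have hdo : sp.map (fun p => p.2 + 1) = order.map (· + 1) := by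
    rw [horder, List.map_map]; rfl
  have hperm : order.Perm ((List.range ds.length).map (fun j : Nat => (j : Int))) := by
    have h1 : sp.Perm pairs := PySem.List.sorted2_perm pairs _ _ false
    have h2 := h1.map (fun p : Int × Int => p.2)
    have h3 : pairs.map (fun p : Int × Int => p.2) = (PySem.List.enumerate ds).map (fun p => p.1) := by
      rw [hpairs, List.map_map]; rfl
    have h4 : (PySem.List.enumerate ds).map (fun p => p.1)
        = (List.range ds.length).map (fun j : Nat => (j : Int)) := by
      rw [PySem.List.map_fst_enumerate ds 0, zero_add, pvPyRange_toNat, Int.toNat_natCast]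
    rw [h3, h4] at h2
    exact h2
  have hds0 : ds.map (List.drop 0) = ds := by
    rw [List.map_congr_left (fun a _ => List.drop_zero (l := a))]
    exact List.map_id ds
  have hval := pvRounds_valid ds order hperm m.toNat 0 (-1)
  rw [hds0, pvOk_eq] at hval
  simp only [Nat.zero_add] at hval
  rw [hdo, hval]
  by_cases hdsnil : ds = []
  · -- no decks: both sides return the (empty) order string
    have hord : order = [] := by
      have h0 : (List.range ds.length).map (fun j : Nat => (j : Int)) = [] := by simp [hdsnil]
      exact (h0 ▸ hperm).eq_nil
    rw [if_pos hdsnil]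
    have hall : ((List.range m.toNat).all fun ρ => pvAllDef ds order ρ) = true := by
      simp [pvAllDef, hord]
    have hchain : pvChain (-1) ((List.range m.toNat).flatMap fun ρ => pvRowVals ds order ρ) = true := by
      have hfm : ((List.range m.toNat).flatMap fun ρ => pvRowVals ds order ρ) = [] := by
        simp [pvRowVals, hord]
      rw [hfm]
      rfl
    rw [hall, hchain]
    simp only [Bool.and_self, if_true]
    rw [List.map_map]
    rfl
  · rw [if_neg hdsnil]
    obtain ⟨mnv, hmn⟩ : ∃ mnv, PySem.List.min? (ds.map (fun d => (d.length : Int))) (fun x => x) = some mnv := by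
      cases h : PySem.List.min? (ds.map (fun d => (d.length : Int))) (fun x => x) with
      | none => exact absurd (by simpa using (PySem.List.min?_eq_none_iff _ _).mp h) hdsnil
      | some v => exact ⟨v, rfl⟩
    rw [hmn]
    simp only [Option.getD_some]
    have hmnmem : ∃ j, ∃ hj : j < ds.length, (ds[j].length : Int) = mnv := by
      have := PySem.List.min?_mem hmn
      simp only [List.mem_map] at this
      obtain ⟨d, hd, hdv⟩ := this
      obtain ⟨j, hj, rfl⟩ := List.getElem_of_mem hd
      exact ⟨j, hj, hdv⟩
    have hmnmin : ∀ d ∈ ds, mnv ≤ (d.length : Int) := by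
      intro d hd
      exact PySem.List.min?_isMin hmn _ (List.mem_map_of_mem hd)
    have hmn0 : 0 ≤ mnv := by obtain ⟨j, hj, hv⟩ := hmnmem; omega
    by_cases hm : m > mnv
    · rw [if_pos hm]
      obtain ⟨j, hj, hv⟩ := hmnmem
      have hallF : ((List.range m.toNat).all fun ρ => pvAllDef ds order ρ) = false := by
        rw [List.all_eq_false]
        refine ⟨mnv.toNat, List.mem_range.mpr (by omega), ?_⟩
        rw [Bool.not_eq_true, pvAllDef, List.all_eq_false]
        refine ⟨(j : Int), hperm.mem_iff.mpr (List.mem_map.mpr ⟨j, List.mem_range.mpr hj, rfl⟩), ?_⟩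
        rw [PySem.List.pyGetD_eq_getElem ds ([] : List Int) (Int.natCast_nonneg j) (by omega)]
        simp only [Int.toNat_natCast, Bool.not_eq_true, decide_eq_false_iff_not, not_lt]
        omega
      rw [hallF]
      simp
    · rw [if_neg hm]
      have hallT : ((List.range m.toNat).all fun ρ => pvAllDef ds order ρ) = true := by
        rw [List.all_eq_true]
        intro ρ hρ
        rw [pvAllDef, List.all_eq_true]
        intro i hi
        have hi' : ∃ a, a < ds.length ∧ (a : Int) = i := by
          simpa using hperm.mem_iff.mp hi
        obtain ⟨a, ha, rfl⟩ := hi'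
        rw [PySem.List.pyGetD_eq_getElem ds ([] : List Int) (Int.natCast_nonneg a) (by omega)]
        simp only [Int.toNat_natCast, decide_eq_true_eq]
        have := hmnmin ds[a] (List.getElem_mem ha)
        have hρm : (ρ : Int) < m := by
          have := List.mem_range.mp hρ
          omega
        omega
      rw [hallT, Bool.true_and]
      have hseq : (PySem.List.pyRange 0 m).flatMap
            (fun r => order.map (fun i => PySem.List.pyGetD (PySem.List.pyGetD ds i []) r 0))
          = (List.range m.toNat).flatMap fun ρ => pvRowVals ds order ρ := by
        rw [pvPyRange_toNat, List.flatMap_map]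
        rfl
      rw [hseq, pvZipAll_eq_chain]
      split_ifs
      · rw [List.map_map]; rfl
      · rfl

-- ===== VERDICT (by name: the statement is the Claim_ definition above) =====
theorem process_test_cases_spec : Claim_equal_process_test_cases := by
  intro n data _ _
  unfold Spec_process_test_cases process_test_cases process_test_cases_alt
  rw [PySem.List.foldl_append_singleton_eq_map, PySem.List.foldl_append_singleton_eq_map]
  exact List.map_congr_left (fun c _ => pvCase_eq c)
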